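-- pv_equiv track=rewrite | github.com/SnoozToolbox/snooz-package-template | modules/AutomaticSleepScoring/Yasa/Yasa.py | mask_list
-- ===== SOURCE A (Python) =====
-- def mask_list(lst, mask_value=None, first_wake=None, last_wake=None, flag=False):
--     """
--     Mask elements outside the range of first and last "WAKE".
--
--     Parameters
--     ----------
--     lst : list
--         List to be masked.
--     mask_value : any
--         Value to mask with.
--     first_wake : int
--         Index of the first wake.
--     last_wake : int
--         Index of the last wake.
--     flag : bool
--         Flag to indicate if first and last wake should be found.
--
--     Returns
--     -------
--     tuple
--         Masked list, first wake index, last wake index.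
--     """
--     try:
--         if flag:
--             first_wake = lst.index("WAKE")
--             last_wake = len(lst) - 1 - lst[::-1].index("WAKE")
--         masked_list = [mask_value if i < first_wake or i > last_wake else lst[i] for i in range(len(lst))]
--         return masked_list, first_wake, last_wake
--     except ValueError:
--         return [mask_value] * len(lst), None, None
-- ===== SOURCE B (Python) =====
-- def mask_list(lst, mask_value=None, first_wake=None, last_wake=None, flag=False):
--     if flag:
--         try:
--             first_wake = lst.index("WAKE")
--         except ValueError:
--             return [mask_value] * len(lst), None, None
--         last_wake = len(lst) - 1 - lst[::-1].index("WAKE")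
--     n = len(lst)
--     if n == 0:
--         return [], first_wake, last_wake
--     lo = min(max(first_wake, 0), n)
--     hi = min(max(last_wake + 1, 0), n)
--     if hi < lo:
--         return [mask_value] * n, first_wake, last_wake
--     return [mask_value] * lo + lst[lo:hi] + [mask_value] * (n - hi), first_wake, last_wake
-- ===== Notes on version B (the rewrite author's own statement) =====
-- stated objective: alternative
-- what changed: B builds the masked list by concatenating three segments (leading mask block, kept middle slice, trailing mask block) instead of A's per-index conditional comprehension over range(len(lst)).
-- outside the precondition, e.g. on mask_list(['N1'], 'M', 3, None, False): A returns (['M'], 3, None), B raises TypeError; on mask_list(['N1'], None, None, None, True): A returns ([None], None, None), B returns ([None], None, None)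
import Mathlib
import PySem

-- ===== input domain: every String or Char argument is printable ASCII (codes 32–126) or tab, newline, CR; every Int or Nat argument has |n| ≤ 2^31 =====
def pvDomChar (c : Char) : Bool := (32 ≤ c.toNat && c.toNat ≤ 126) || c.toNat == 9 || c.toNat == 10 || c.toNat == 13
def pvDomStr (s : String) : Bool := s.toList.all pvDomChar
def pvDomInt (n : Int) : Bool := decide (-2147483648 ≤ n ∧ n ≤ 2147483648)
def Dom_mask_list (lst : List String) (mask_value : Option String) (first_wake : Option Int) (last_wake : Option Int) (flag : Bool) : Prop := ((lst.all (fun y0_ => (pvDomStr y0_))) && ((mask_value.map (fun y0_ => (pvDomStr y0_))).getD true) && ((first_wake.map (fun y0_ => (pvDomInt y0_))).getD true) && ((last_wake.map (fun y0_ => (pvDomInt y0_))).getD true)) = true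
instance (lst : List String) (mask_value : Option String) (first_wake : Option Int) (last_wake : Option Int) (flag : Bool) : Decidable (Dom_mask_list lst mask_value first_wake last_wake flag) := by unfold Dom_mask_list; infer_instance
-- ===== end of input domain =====

-- B builds the masked output as three concatenated segments instead of A's per-index
-- conditional comprehension; equivalence is proved on Pre_ (see below).

-- ===== PORT A =====
-- A's comprehension: [mask_value if i < first_wake or i > last_wake else lst[i] for i in range(len(lst))]
def maskByIndex (lst : List String) (m : String) (fwi lwi : Int) : List String :=
  (List.range lst.length).map (fun (i : Nat) => if (i : Int) < fwi ∨ (i : Int) > lwi then m else lst.getD i "")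

def mask_list (lst : List String) (mask_value : Option String) (first_wake : Option Int) (last_wake : Option Int) (flag : Bool) : List String × Option Int × Option Int :=
  if flag then
    -- first_wake = lst.index("WAKE"); last_wake = len(lst)-1 - lst[::-1].index("WAKE"); ValueError → [mask]*len, None, None
    match PySem.List.index? lst "WAKE" with
    | none => (List.replicate lst.length (mask_value.getD ""), none, none)
    | some f =>
      match PySem.List.index? lst.reverse "WAKE" with
      | none => (List.replicate lst.length (mask_value.getD ""), none, none)
      | some r =>
        let fwi : Int := (f : Int)
        let lwi : Int := (lst.length : Int) - 1 - (r : Int)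
        (maskByIndex lst (mask_value.getD "") fwi lwi, some fwi, some lwi)
  else
    -- Pre_ guarantees first_wake/last_wake are some (else Python raises TypeError, except one corner
    -- excluded by Pre_ because B raises there) unless lst = []
    (maskByIndex lst (mask_value.getD "") (first_wake.getD 0) (last_wake.getD 0), first_wake, last_wake)

-- ===== PORT B =====
-- B's segment construction: [m]*lo ++ lst[lo:hi] ++ [m]*(n-hi)
def maskSegments (lst : List String) (m : String) (fwi lwi : Int) : List String :=
  let n : Int := (lst.length : Int)
  let lo : Int := min (max fwi 0) n
  let hi : Int := min (max (lwi + 1) 0) n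
  if hi < lo then List.replicate lst.length m
  else List.replicate lo.toNat m ++ PySem.List.slice lst (some lo) (some hi) ++ List.replicate ((n - hi).toNat) m

def mask_list_alt (lst : List String) (mask_value : Option String) (first_wake : Option Int) (last_wake : Option Int) (flag : Bool) : List String × Option Int × Option Int :=
  if flag then
    match PySem.List.index? lst "WAKE" with
    | none => (List.replicate lst.length (mask_value.getD ""), none, none)
    | some f =>
      let lwi : Int := (lst.length : Int) - 1 - (((PySem.List.index? lst.reverse "WAKE").getD 0 : Nat) : Int)
      (maskSegments lst (mask_value.getD "") (f : Int) lwi, some (f : Int), some lwi)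
  else
    if lst.length = 0 then ([], first_wake, last_wake)
    else (maskSegments lst (mask_value.getD "") (first_wake.getD 0) (last_wake.getD 0), first_wake, last_wake)

-- ===== PRECONDITION & SPEC =====
-- Pre_ excludes (a) inputs where flag is false and first_wake or last_wake is None on a non-empty
-- list: there Python A raises TypeError on the None comparison except in the corner where
-- first_wake ≥ len(lst) short-circuits every comparison, and in that corner B's own arithmetic
-- (last_wake + 1) itself raises TypeError; and (b) inputs where mask_value is None and at least one
-- element is actually masked: the returned list then contains None, not a value of the declared
-- List String type (when mask_value is None but nothing is masked, A returns a pure string list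
-- and B matches it, so those inputs stay inside Pre_).
def Pre_mask_list (lst : List String) (mask_value : Option String) (first_wake : Option Int) (last_wake : Option Int) (flag : Bool) : Prop :=
  (flag = false → (lst = [] ∨ (first_wake ≠ none ∧ last_wake ≠ none))) ∧
  (mask_value = none →
    (if flag then
       (if "WAKE" ∈ lst then lst.head? = some "WAKE" ∧ lst.getLast? = some "WAKE" else lst = [])
     else (lst = [] ∨ (first_wake.getD 0 ≤ 0 ∧ (lst.length : Int) - 1 ≤ last_wake.getD 0))))
instance (lst : List String) (mask_value : Option String) (first_wake : Option Int) (last_wake : Option Int) (flag : Bool) : Decidable (Pre_mask_list lst mask_value first_wake last_wake flag) := by unfold Pre_mask_list; infer_instance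

def pvWitness_mask_list : List String × Option String × Option Int × Option Int × Bool := (["N1", "WAKE", "N2"], some "M", none, none, true)

def Spec_mask_list (lst : List String) (mask_value : Option String) (first_wake : Option Int) (last_wake : Option Int) (flag : Bool) (out : List String × Option Int × Option Int) : Prop := out = mask_list_alt lst mask_value first_wake last_wake flag
instance (lst : List String) (mask_value : Option String) (first_wake : Option Int) (last_wake : Option Int) (flag : Bool) (out : List String × Option Int × Option Int) : Decidable (Spec_mask_list lst mask_value first_wake last_wake flag out) := by unfold Spec_mask_list; infer_instance

-- ===== CLAIM (what is proved, stated in full; the proofs are below) =====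
def Claim_equal_mask_list : Prop := ∀ (lst : List String) (mask_value : Option String) (first_wake : Option Int) (last_wake : Option Int) (flag : Bool), Dom_mask_list lst mask_value first_wake last_wake flag → Pre_mask_list lst mask_value first_wake last_wake flag → Spec_mask_list lst mask_value first_wake last_wake flag (mask_list lst mask_value first_wake last_wake flag)

-- ===== LEMMAS AND PROOFS =====

-- core: the three-segment build equals the per-index conditional build
-- Nat-level form of the segment identity
theorem seg_nat (lst : List String) (m : String) (a b : Nat) (hab : a ≤ b) (hbn : b ≤ lst.length) :
    List.replicate a m ++ (lst.drop a).take (b - a) ++ List.replicate (lst.length - b) m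
    = (List.range lst.length).map (fun (i : Nat) => if i < a ∨ b ≤ i then m else lst.getD i "") := by
  apply List.ext_getElem
  · simp; omega
  · intro i h1 h2
    simp only [List.length_map, List.length_range] at h2
    simp only [List.getElem_map, List.getElem_range]
    by_cases hia : i < a
    · rw [List.getElem_append_left (by simp; omega)]
      rw [List.getElem_append_left (by simpa using hia)]
      simp [hia]
    · by_cases hib : i < b
      · rw [List.getElem_append_left (by simp; omega)]
        rw [List.getElem_append_right (by simpa using hia)]
        simp only [List.length_replicate, List.getElem_take, List.getElem_drop]
        rw [if_neg (by omega)]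
        rw [List.getD_eq_getElem lst "" (by simpa using h2)]
        congr 1; omega
      · rw [List.getElem_append_right (by simp; omega)]
        simp only [List.getElem_replicate]
        rw [if_pos (by omega)]

theorem maskSegments_eq (lst : List String) (m : String) (fwi lwi : Int) :
    maskSegments lst m fwi lwi = maskByIndex lst m fwi lwi := by
  unfold maskSegments maskByIndex
  simp only []
  by_cases hcross : min (max (lwi + 1) 0) ((lst.length : Nat) : Int) < min (max fwi 0) ((lst.length : Nat) : Int)
  · rw [if_pos hcross]
    apply List.ext_getElem
    · simp
    · intro i h1 h2
      simp only [List.length_map, List.length_range] at h2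
      simp only [List.getElem_replicate, List.getElem_map, List.getElem_range]
      rw [if_pos (by omega)]
  · rw [if_neg hcross]
    have h0lo : (0 : Int) ≤ min (max fwi 0) ((lst.length : Nat) : Int) := by omega
    have h0hi : (0 : Int) ≤ min (max (lwi + 1) 0) ((lst.length : Nat) : Int) := by omega
    rw [PySem.List.slice_toNat lst _ _]
    have := seg_nat lst m (min (max fwi 0) ((lst.length : Nat) : Int)).toNat
      (min (max (lwi + 1) 0) ((lst.length : Nat) : Int)).toNat (by omega) (by omega)
    rw [show ((lst.length : Int) - min (max (lwi + 1) 0) ((lst.length : Nat) : Int)).toNat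
        = lst.length - (min (max (lwi + 1) 0) ((lst.length : Nat) : Int)).toNat from by omega]
    rw [this]
    apply List.map_congr_left
    intro i hi
    simp only [List.mem_range] at hi
    by_cases hc : (i : Int) < fwi ∨ (i : Int) > lwi
    · rw [if_pos hc, if_pos (by omega)]
    · rw [if_neg hc, if_neg (by omega)]
    exact h0lo
    exact h0hi

theorem mask_list_spec : Claim_equal_mask_list := by
  intro lst mv fw lw flag hdom hpre
  unfold Spec_mask_list mask_list mask_list_alt
  by_cases hf : flag = true
  · rw [if_pos hf, if_pos hf]
    cases hidx : PySem.List.index? lst "WAKE" with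
    | none => rfl
    | some f =>
      have hmem : "WAKE" ∈ lst := by
        have h := (PySem.List.index?_isSome_iff (xs := lst) (v := "WAKE")).mp
          (by rw [hidx]; exact rfl)
        exact h
      have hrmem : "WAKE" ∈ lst.reverse := by simpa using hmem
      obtain ⟨r, hr⟩ : ∃ r, PySem.List.index? lst.reverse "WAKE" = some r := by
        have := (PySem.List.index?_isSome_iff (xs := lst.reverse) (v := "WAKE")).mpr hrmem
        exact Option.isSome_iff_exists.mp this
      rw [hr]
      simp only [Option.getD_some, maskSegments_eq]
  · rw [if_neg hf, if_neg hf]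
    rcases hpre with ⟨h1, _⟩
    rcases h1 (by simpa using hf) with hemp | ⟨hfw, hlw⟩
    · subst hemp
      simp [maskByIndex]
    · by_cases hemp : lst.length = 0
      · rw [if_pos hemp]
        have : lst = [] := List.length_eq_zero_iff.mp hemp
        subst this
        simp [maskByIndex]
      · rw [if_neg hemp, maskSegments_eq]
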